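-- pv_equiv track=rewrite | github.com/astrocinco/2c2023-TDA-TP3 | backtracking/backtracking.py | es_solucion_posible
-- ===== SOURCE A (Python) =====
-- def es_solucion_posible(jugadores_restantes, faltantes):
--     posibles = set()
--     for j in jugadores_restantes:
--         for i in jugadores_restantes[j]:
--             posibles.add(i)
--
--     for f in faltantes:
--         if not f in posibles:
--             return False
--     return True
-- ===== SOURCE B (Python) =====
-- def es_solucion_posible(jugadores_restantes, faltantes):
--     for f in faltantes:
--         if not any(f in jugadores_restantes[j] for j in jugadores_restantes):
--             return False
--     return True
-- ===== Notes on version B (the rewrite author's own statement) =====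
-- stated objective: alternative
-- what changed: B drops the precomputed set of reachable values and instead, for each faltante, scans the dict's value-lists directly with any(), short-circuiting on the first missing one.
import Mathlib
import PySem

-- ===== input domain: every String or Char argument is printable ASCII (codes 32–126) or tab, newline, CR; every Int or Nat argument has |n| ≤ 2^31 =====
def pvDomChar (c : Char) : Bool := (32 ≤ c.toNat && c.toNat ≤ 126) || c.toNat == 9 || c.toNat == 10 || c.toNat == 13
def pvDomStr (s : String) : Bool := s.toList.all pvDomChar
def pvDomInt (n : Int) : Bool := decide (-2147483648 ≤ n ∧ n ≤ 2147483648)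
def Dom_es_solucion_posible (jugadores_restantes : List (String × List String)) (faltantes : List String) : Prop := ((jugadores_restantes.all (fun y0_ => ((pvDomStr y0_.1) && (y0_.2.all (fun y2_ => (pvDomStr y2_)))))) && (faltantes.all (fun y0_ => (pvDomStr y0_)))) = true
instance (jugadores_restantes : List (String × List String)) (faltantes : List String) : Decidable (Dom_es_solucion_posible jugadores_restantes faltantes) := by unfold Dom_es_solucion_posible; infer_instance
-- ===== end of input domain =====

-- B replaces A's precomputed set of reachable values by a direct per-faltante scan of the
-- dict's value-lists (alternative decomposition, same results).
-- ===== PORT A =====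
-- hand port of Python's dict lookup d[k] on an assoc list: value of the first matching key
def dictLookup (d : List (String × List String)) (k : String) : List String :=
  ((d.find? (fun q => q.1 == k)).map Prod.snd).getD []

def es_solucion_posible (jugadores_restantes : List (String × List String)) (faltantes : List String) : Bool :=
  -- posibles = set(); for j in jugadores_restantes: for i in jugadores_restantes[j]: posibles.add(i)
  -- jugadores_restantes[j]: dict lookup = first match on the key; exact since a dict's keys are distinct
  let posibles : PySem.Set String :=
    jugadores_restantes.foldl
      (fun s p => (dictLookup jugadores_restantes p.1).foldl (fun s i => PySem.Set.add s i) s)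
      PySem.Set.empty
  -- for f in faltantes: if not f in posibles: return False;  return True
  faltantes.all (fun f => PySem.Set.contains posibles f)

-- ===== PORT B =====
def es_solucion_posible_alt (jugadores_restantes : List (String × List String)) (faltantes : List String) : Bool :=
  faltantes.all (fun f => jugadores_restantes.any (fun p => p.2.contains f))

-- ===== PRECONDITION & SPEC =====
-- Pre_ excludes association lists with duplicate keys: those do not encode any Python dict
-- (a Python dict cannot hold a key twice), and on them the encoding's first-match lookup
-- order is accidental.
def Pre_es_solucion_posible (jugadores_restantes : List (String × List String)) (faltantes : List String) : Prop :=
  (jugadores_restantes.map Prod.fst).Nodup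
instance (jugadores_restantes : List (String × List String)) (faltantes : List String) : Decidable (Pre_es_solucion_posible jugadores_restantes faltantes) := by unfold Pre_es_solucion_posible; infer_instance
def pvWitness_es_solucion_posible : (List (String × List String)) × List String :=
  ([("a", ["x", "y"]), ("b", ["z"])], ["y", "z"])

def Spec_es_solucion_posible (jugadores_restantes : List (String × List String)) (faltantes : List String) (out : Bool) : Prop := out = es_solucion_posible_alt jugadores_restantes faltantes
instance (jugadores_restantes : List (String × List String)) (faltantes : List String) (out : Bool) : Decidable (Spec_es_solucion_posible jugadores_restantes faltantes out) := by unfold Spec_es_solucion_posible; infer_instance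

-- ===== CLAIM (what is proved, stated in full; the proofs are below) =====
def Claim_equal_es_solucion_posible : Prop := ∀ (jugadores_restantes : List (String × List String)) (faltantes : List String), Dom_es_solucion_posible jugadores_restantes faltantes → Pre_es_solucion_posible jugadores_restantes faltantes → Spec_es_solucion_posible jugadores_restantes faltantes (es_solucion_posible jugadores_restantes faltantes)

-- ===== LEMMAS AND PROOFS =====

-- Membership in a fold of nested Set.add over value lists produced by g.
theorem mem_foldl_add_nested {α β : Type} [BEq α] [LawfulBEq α] (g : β → List α)
    (l : List β) (s : PySem.Set α) (x : α) :
    (x ∈ l.foldl (fun s p => (g p).foldl (fun s i => PySem.Set.add s i) s) s) ↔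
      (x ∈ s ∨ ∃ p ∈ l, x ∈ g p) := by
  induction l generalizing s with
  | nil => simp
  | cons hd tl ih =>
    simp only [List.foldl_cons, ih, List.mem_cons]
    constructor
    · rintro (h | ⟨p, hp, hx⟩)
      · rw [show (g hd).foldl (fun s i => PySem.Set.add s i) s = PySem.Set.update s (g hd) from rfl,
            PySem.Set.mem_update] at h
        rcases h with h | h
        · exact Or.inl h
        · exact Or.inr ⟨hd, Or.inl rfl, h⟩
      · exact Or.inr ⟨p, Or.inr hp, hx⟩
    · rintro (h | ⟨p, hp | hp, hx⟩)
      · exact Or.inl (by rw [show (g hd).foldl (fun s i => PySem.Set.add s i) s = PySem.Set.update s (g hd) from rfl, PySem.Set.mem_update]; exact Or.inl h)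
      · exact Or.inl (by rw [show (g hd).foldl (fun s i => PySem.Set.add s i) s = PySem.Set.update s (g hd) from rfl, PySem.Set.mem_update]; subst hp; exact Or.inr hx)
      · exact Or.inr ⟨p, hp, hx⟩

-- With nodup keys, looking the key of an entry up yields that entry's value.
theorem dictLookup_fst_of_mem (d : List (String × List String))
    (hnd : (d.map Prod.fst).Nodup) (p : String × List String) (hp : p ∈ d) :
    dictLookup d p.1 = p.2 := by
  induction d with
  | nil => cases hp
  | cons hd tl ih =>
    rcases List.mem_cons.mp hp with rfl | hp
    · simp [dictLookup]
    · have hne : hd.1 ≠ p.1 := by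
        intro h
        have : p.1 ∈ tl.map Prod.fst := List.mem_map.mpr ⟨p, hp, rfl⟩
        rw [List.map_cons, List.nodup_cons, h] at hnd
        exact hnd.1 this
      have : (hd.1 == p.1) = false := beq_eq_false_iff_ne.mpr hne
      simp only [dictLookup, List.find?_cons, this]
      exact ih (List.nodup_cons.mp (by simpa using hnd)).2 hp


theorem contains_posibles (jr : List (String × List String)) (f : String) :
    (PySem.Set.contains (jr.foldl (fun s p => (dictLookup jr p.1).foldl (fun s i => PySem.Set.add s i) s) PySem.Set.empty) f)
      = jr.any (fun p => (dictLookup jr p.1).contains f) := by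
  rw [Bool.eq_iff_iff]
  simp only [List.any_eq_true, PySem.Set.contains, List.contains_iff_mem,
    PySem.Set.empty]
  rw [mem_foldl_add_nested (fun p : String × List String => dictLookup jr p.1) jr [] f]
  simp

theorem ports_agree (jr : List (String × List String)) (fa : List String) (hpre : Pre_es_solucion_posible jr fa) :
    es_solucion_posible jr fa = es_solucion_posible_alt jr fa := by
  have hany : ∀ f, jr.any (fun p => (dictLookup jr p.1).contains f) = jr.any (fun p => p.2.contains f) := by
    intro f
    rw [Bool.eq_iff_iff]
    simp only [List.any_eq_true]
    constructor
    · rintro ⟨p, hp, h⟩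
      exact ⟨p, hp, by rwa [dictLookup_fst_of_mem jr hpre p hp] at h⟩
    · rintro ⟨p, hp, h⟩
      exact ⟨p, hp, by rwa [dictLookup_fst_of_mem jr hpre p hp]⟩
  simp only [es_solucion_posible, es_solucion_posible_alt]
  simp only [contains_posibles, hany]

-- ===== VERDICT (by name: the statement is the Claim_ definition above) =====
theorem es_solucion_posible_spec : Claim_equal_es_solucion_posible := by
  intro jr fa _ hpre
  unfold Spec_es_solucion_posible
  exact ports_agree jr fa hpre
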